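-- pv_equiv track=rewrite | github.com/safer-strategy/data-transformation-tool | src/header_mapper.py | detect_possible_tabs
-- ===== SOURCE A (Python) =====
-- from typing import List, Dict, Tuple, Set
--
-- def detect_possible_tabs(headers: List[str]) -> List[str]:
--     """Detect which tabs are likely present based on column headers."""
--     detected_tabs = []
--     headers_lower = [h.lower() for h in headers]
--
--     # Define signature columns for each tab type
--     tab_signatures = {
--         'Users': ['user', 'username', 'email'],
--         'Groups': ['group', 'groupname'],
--         'Roles': ['role', 'permission', 'access'],
--         'Resources': ['resource', 'application']
--     }
--
--     for tab_name, signatures in tab_signatures.items():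
--         if any(any(sig in h for h in headers_lower) for sig in signatures):
--             detected_tabs.append(tab_name)
--
--     return detected_tabs
-- ===== SOURCE B (Python) =====
-- def detect_possible_tabs(headers):
--     """Detect which tabs are likely present based on column headers.
--
--     Single pass keeping a 4-bit mask (bit i = tab i detected), with early exit
--     once all four bits are set.  'username' contains 'user' and 'groupname'
--     contains 'group', so those redundant signatures are dropped."""
--     mask = 0
--     for h in headers:
--         hl = h.lower()
--         if 'user' in hl or 'email' in hl:
--             mask |= 1
--         if 'group' in hl:
--             mask |= 2
--         if 'role' in hl or 'permission' in hl or 'access' in hl: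
--             mask |= 4
--         if 'resource' in hl or 'application' in hl:
--             mask |= 8
--         if mask == 15:
--             break
--     return [t for i, t in enumerate(('Users', 'Groups', 'Roles', 'Resources'))
--             if mask >> i & 1]
-- ===== Notes on version B (the rewrite author's own statement) =====
-- stated objective: faster
-- what changed: B replaces the per-tab any-of-any substring scans with a single pass over the headers maintaining a 4-bit detection mask (with early exit once all bits are set), drops the redundant signatures 'username' and 'groupname' (implied by the 'user'/'group' substring tests), and decodes the mask into the canonical tab order at the end.
import Mathlib
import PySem

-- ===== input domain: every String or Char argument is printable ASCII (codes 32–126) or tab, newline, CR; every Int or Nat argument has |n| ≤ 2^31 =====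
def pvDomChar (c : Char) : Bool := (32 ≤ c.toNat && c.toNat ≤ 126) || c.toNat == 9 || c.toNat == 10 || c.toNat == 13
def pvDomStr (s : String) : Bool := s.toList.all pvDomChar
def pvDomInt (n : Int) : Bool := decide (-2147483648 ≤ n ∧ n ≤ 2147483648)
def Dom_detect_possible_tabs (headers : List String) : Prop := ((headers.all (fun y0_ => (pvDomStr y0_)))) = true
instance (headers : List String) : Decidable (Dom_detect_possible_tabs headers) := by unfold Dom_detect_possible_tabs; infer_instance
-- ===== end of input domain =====

-- B: single pass over the headers maintaining a 4-bit detection mask with early exit,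
-- redundant signatures 'username'/'groupname' dropped, mask decoded into the canonical
-- tab order at the end (constant-factor faster in a timing run).

-- ===== PORT A =====
def detect_possible_tabs (headers : List String) : List String :=
  let headers_lower := headers.map PySem.Str.lower
  let tab_signatures : List (String × List String) :=
    [("Users", ["user", "username", "email"]),
     ("Groups", ["group", "groupname"]),
     ("Roles", ["role", "permission", "access"]),
     ("Resources", ["resource", "application"])]
  tab_signatures.foldl
    (fun detected_tabs p =>
      if p.2.any (fun sig => headers_lower.any (fun h => PySem.Str.isIn sig h)) then
        detected_tabs ++ [p.1]
      else detected_tabs)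
    []

-- ===== PORT B =====
-- body of B's for-loop: the four `mask |= …` updates on one header
def pvStep (m : Nat) (h : String) : Nat :=
  let hl := PySem.Str.lower h
  let m := if PySem.Str.isIn "user" hl || PySem.Str.isIn "email" hl then m ||| 1 else m
  let m := if PySem.Str.isIn "group" hl then m ||| 2 else m
  let m := if PySem.Str.isIn "role" hl || PySem.Str.isIn "permission" hl || PySem.Str.isIn "access" hl then m ||| 4 else m
  let m := if PySem.Str.isIn "resource" hl || PySem.Str.isIn "application" hl then m ||| 8 else m
  m

-- B's for-loop with the early `break` once the mask is full
def pvGo : List String → Nat → Nat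
  | [], m => m
  | h :: t, m =>
      let m' := pvStep m h
      if m' == 15 then m' else pvGo t m'

def detect_possible_tabs_alt (headers : List String) : List String :=
  let mask := pvGo headers 0
  ((["Users", "Groups", "Roles", "Resources"] : List String).zipIdx.filter
      (fun p => (mask >>> p.2) &&& 1 == 1)).map Prod.fst

-- ===== PRECONDITION & SPEC =====
def Spec_detect_possible_tabs (headers : List String) (out : List String) : Prop := out = detect_possible_tabs_alt headers
instance (headers : List String) (out : List String) : Decidable (Spec_detect_possible_tabs headers out) := by unfold Spec_detect_possible_tabs; infer_instance

-- ===== CLAIM (what is proved, stated in full; the proofs are below) =====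
def Claim_equal_detect_possible_tabs : Prop := ∀ (headers : List String), Dom_detect_possible_tabs headers → Spec_detect_possible_tabs headers (detect_possible_tabs headers)

-- ===== LEMMAS AND PROOFS =====

-- B's per-header condition for bit i (i = 0..3)
def pvCond : Nat → String → Bool
  | 0, h => PySem.Str.isIn "user" (PySem.Str.lower h) || PySem.Str.isIn "email" (PySem.Str.lower h)
  | 1, h => PySem.Str.isIn "group" (PySem.Str.lower h)
  | 2, h => PySem.Str.isIn "role" (PySem.Str.lower h) || PySem.Str.isIn "permission" (PySem.Str.lower h) || PySem.Str.isIn "access" (PySem.Str.lower h)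
  | _, h => PySem.Str.isIn "resource" (PySem.Str.lower h) || PySem.Str.isIn "application" (PySem.Str.lower h)

theorem pvStep_testBit (m : Nat) (h : String) (i : Nat) (hi : i < 4) :
    (pvStep m h).testBit i = (m.testBit i || pvCond i h) := by
  simp only [pvStep]
  interval_cases i <;> split_ifs <;>
    simp_all [pvCond, Nat.testBit_or,
      show Nat.testBit 1 0 = true from by decide,
      show Nat.testBit 1 1 = false from by decide,
      show Nat.testBit 1 2 = false from by decide,
      show Nat.testBit 1 3 = false from by decide,
      show Nat.testBit 2 0 = false from by decide,
      show Nat.testBit 2 1 = true from by decide,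
      show Nat.testBit 2 2 = false from by decide,
      show Nat.testBit 2 3 = false from by decide,
      show Nat.testBit 4 0 = false from by decide,
      show Nat.testBit 4 1 = false from by decide,
      show Nat.testBit 4 2 = true from by decide,
      show Nat.testBit 4 3 = false from by decide,
      show Nat.testBit 8 0 = false from by decide,
      show Nat.testBit 8 1 = false from by decide,
      show Nat.testBit 8 2 = false from by decide,
      show Nat.testBit 8 3 = true from by decide]

theorem pvGo_testBit (hs : List String) (m : Nat) (i : Nat) (hi : i < 4) :
    (pvGo hs m).testBit i = (m.testBit i || hs.any (pvCond i)) := by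
  induction hs generalizing m with
  | nil => simp [pvGo]
  | cons h t ih =>
    simp only [pvGo, List.any_cons]
    have h15 : Nat.testBit 15 i = true := by interval_cases i <;> decide
    by_cases hfull : pvStep m h = 15
    · have hstep := pvStep_testBit m h i hi
      rw [hfull, h15] at hstep
      simp only [hfull, beq_self_eq_true, if_true, h15, ← Bool.or_assoc, ← hstep]
      simp
    · simp only [beq_iff_eq, hfull, if_false]
      rw [ih, pvStep_testBit m h i hi, Bool.or_assoc]

-- 'user' ⊑ 'username' and 'group' ⊑ 'groupname': the dropped signatures are redundant
theorem pv_username_redundant (hl : String) :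
    PySem.Str.isIn "username" hl = true → PySem.Str.isIn "user" hl = true := by
  intro hu
  rw [PySem.Str.isIn_iff_infix] at hu ⊢
  exact List.IsInfix.trans (by decide) hu

theorem pv_groupname_redundant (hl : String) :
    PySem.Str.isIn "groupname" hl = true → PySem.Str.isIn "group" hl = true := by
  intro hu
  rw [PySem.Str.isIn_iff_infix] at hu ⊢
  exact List.IsInfix.trans (by decide) hu

-- A's per-tab condition equals "some header satisfies pvCond i"
theorem pv_condA (headers : List String) (i : Nat) (sigs : List String)
    (hred : ∀ h, sigs.any (fun sig => PySem.Str.isIn sig (PySem.Str.lower h)) = pvCond i h) :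
    sigs.any (fun sig => (headers.map PySem.Str.lower).any (fun h => PySem.Str.isIn sig h))
      = headers.any (pvCond i) := by
  rw [Bool.eq_iff_iff]
  simp only [List.any_eq_true, List.mem_map]
  constructor
  · rintro ⟨sig, hsig, _, ⟨h, hh, rfl⟩, hin⟩
    refine ⟨h, hh, ?_⟩
    rw [← hred h]
    exact List.any_eq_true.mpr ⟨sig, hsig, hin⟩
  · rintro ⟨h, hh, hc⟩
    rw [← hred h] at hc
    obtain ⟨sig, hsig, hin⟩ := List.any_eq_true.mp hc
    exact ⟨sig, hsig, _, ⟨h, hh, rfl⟩, hin⟩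

theorem pv_bit_mask (headers : List String) (i : Nat) (hi : i < 4) :
    ((pvGo headers 0 >>> i) &&& 1 == 1) = headers.any (pvCond i) := by
  have ht : (pvGo headers 0).testBit i = headers.any (pvCond i) := by
    rw [pvGo_testBit headers 0 i hi]; simp
  rw [← ht, Nat.testBit]
  cases h : (pvGo headers 0 >>> i) &&& 1 <;> simp [Nat.and_one_is_mod] at h ⊢ <;> omega

-- ===== VERDICT (by name: the statement is the Claim_ definition above) =====
set_option maxHeartbeats 1000000 in
theorem detect_possible_tabs_spec : Claim_equal_detect_possible_tabs := by
  intro headers _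
  unfold Spec_detect_possible_tabs detect_possible_tabs detect_possible_tabs_alt
  simp only [List.foldl_cons, List.foldl_nil]
  rw [pv_condA headers 0 ["user", "username", "email"]
        (by intro h
            simp only [List.any_cons, List.any_nil, pvCond, Bool.or_false]
            rw [Bool.eq_iff_iff]; simp only [Bool.or_eq_true]
            constructor
            · rintro (h1 | h1 | h1)
              exacts [Or.inl h1, Or.inl (pv_username_redundant _ h1), Or.inr h1]
            · tauto),
      pv_condA headers 1 ["group", "groupname"]
        (by intro h
            simp only [List.any_cons, List.any_nil, pvCond, Bool.or_false]
            rw [Bool.eq_iff_iff]; simp only [Bool.or_eq_true]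
            constructor
            · rintro (h1 | h1)
              exacts [h1, pv_groupname_redundant _ h1]
            · tauto),
      pv_condA headers 2 ["role", "permission", "access"]
        (by intro h; simp [pvCond, Bool.or_assoc]),
      pv_condA headers 3 ["resource", "application"]
        (by intro h; simp [pvCond, Bool.or_assoc])]
  have b0 := pv_bit_mask headers 0 (by omega)
  have b1 := pv_bit_mask headers 1 (by omega)
  have b2 := pv_bit_mask headers 2 (by omega)
  have b3 := pv_bit_mask headers 3 (by omega)
  by_cases h0 : headers.any (pvCond 0) <;>
  by_cases h1 : headers.any (pvCond 1) <;>
  by_cases h2 : headers.any (pvCond 2) <;>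
  by_cases h3 : headers.any (pvCond 3) <;>
    simp only [List.zipIdx_cons, List.zipIdx_nil, List.filter_cons, List.filter_nil,
      Nat.zero_add, Nat.reduceAdd, b0, b1, b2, b3, h0, h1, h2, h3, if_true, if_false,
      Bool.false_eq_true, List.map_cons, List.map_nil] <;> rfl
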